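-- pv_equiv track=rewrite | github.com/bvarsur/cloud-incident-diagnosis-ai-agent | src/log_parser.py | _extract_metadata_from_dict
-- ===== SOURCE A (Python) =====
-- from typing import List, Dict, Any, Optional
--
-- def _extract_metadata_from_dict(entry: Dict[str, Any]) -> Dict[str, Any]:
--     """Extract metadata from dictionary entry"""
--     metadata = {}
--
--     # Common metadata fields
--     metadata_fields = [
--         'user_id', 'request_id', 'session_id', 'ip_address',
--         'http_status', 'status_code', 'response_time', 'duration',
--         'source_ip', 'user_agent', 'endpoint', 'method'
--     ]
--
--     for field in metadata_fields:
--         if field in entry: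
--             metadata[field] = entry[field]
--
--     return metadata
-- ===== SOURCE B (Python) =====
-- _FIELDS = ('user_id', 'request_id', 'session_id', 'ip_address',
--            'http_status', 'status_code', 'response_time', 'duration',
--            'source_ip', 'user_agent', 'endpoint', 'method')
--
-- _SLOT = {f: i for i, f in enumerate(_FIELDS)}
--
--
-- def _extract_metadata_from_dict(entry):
--     """Extract metadata from dictionary entry"""
--     # One pass over the input, dispatching each item into a fixed slot table
--     # indexed by the field's canonical position; emit the occupied slots.
--     slots = [None] * len(_FIELDS)
--     for k, v in entry.items():
--         i = _SLOT.get(k)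
--         if i is not None:
--             slots[i] = (k, v)
--     return dict(p for p in slots if p is not None)
-- ===== Notes on version B (the rewrite author's own statement) =====
-- stated objective: alternative
-- what changed: B replaces A's probe-per-known-field loop by a single pass over the input's items that dispatches each item into a fixed positional slot table (field name -> slot index), then emits the occupied slots in canonical order; the Lean Pre_ only excludes association lists with duplicate keys, which do not encode any Python dict.
import Mathlib
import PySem

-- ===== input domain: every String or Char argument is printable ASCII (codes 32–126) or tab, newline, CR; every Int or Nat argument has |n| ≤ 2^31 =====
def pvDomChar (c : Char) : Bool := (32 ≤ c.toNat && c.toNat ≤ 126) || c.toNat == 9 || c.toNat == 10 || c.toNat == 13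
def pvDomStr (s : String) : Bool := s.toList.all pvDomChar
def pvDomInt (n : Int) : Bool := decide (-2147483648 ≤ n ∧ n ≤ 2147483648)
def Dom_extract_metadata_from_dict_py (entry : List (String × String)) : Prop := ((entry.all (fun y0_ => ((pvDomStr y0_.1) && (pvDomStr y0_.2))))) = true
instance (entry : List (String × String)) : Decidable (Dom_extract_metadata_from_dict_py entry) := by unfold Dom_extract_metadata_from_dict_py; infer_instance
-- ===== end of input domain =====

-- B replaces A's probe-per-known-field loop by one pass over the input that dispatches each item
-- into a fixed positional slot table and then emits the occupied slots (objective: alternative).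


-- ===== PORT A =====
def metadataFields : List String :=
  ["user_id", "request_id", "session_id", "ip_address",
   "http_status", "status_code", "response_time", "duration",
   "source_ip", "user_agent", "endpoint", "method"]

def extract_metadata_from_dict_py (entry : List (String × String)) : List (String × String) :=
  (metadataFields.foldl (fun m f =>
      match (PySem.Dict.mk entry).get? f with
      | some v => m.insert f v
      | none => m)
    PySem.Dict.empty).items

-- ===== PORT B =====
def fieldOrder : List String :=
  ["user_id", "request_id", "session_id", "ip_address",
   "http_status", "status_code", "response_time", "duration",
   "source_ip", "user_agent", "endpoint", "method"]

-- _SLOT = {f: i for i, f in enumerate(_FIELDS)}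
def fieldSlots : PySem.Dict String Int :=
  PySem.Dict.mk ((PySem.List.enumerate fieldOrder).map (fun p => (p.2, p.1)))

-- the per-item loop body: dispatch the item into its slot (the index is always in range)
def slotStep (slots : List (Option (String × String))) (p : String × String) :
    List (Option (String × String)) :=
  match fieldSlots.get? p.1 with
  | some i => PySem.List.pySetD slots i (some p)
  | none => slots

def extract_metadata_from_dict_py_alt (entry : List (String × String)) : List (String × String) :=
  let slots := entry.foldl slotStep (List.replicate 12 none)
  -- dict(p for p in slots if p is not None); the occupied slots carry distinct keys
  (PySem.Dict.ofList (slots.filterMap id)).items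

-- ===== PRECONDITION & SPEC =====
-- Pre_ excludes association lists with duplicate keys: 'entry' encodes a Python dict, whose keys
-- are distinct, so such lists do not represent any input the Python function can receive.
def Pre_extract_metadata_from_dict_py (entry : List (String × String)) : Prop :=
  (entry.map Prod.fst).Nodup
instance (entry : List (String × String)) : Decidable (Pre_extract_metadata_from_dict_py entry) := by unfold Pre_extract_metadata_from_dict_py; infer_instance

def pvWitness_extract_metadata_from_dict_py : (List (String × String)) :=
  [("user_id", "u-17"), ("message", "timeout"), ("method", "GET")]

def Spec_extract_metadata_from_dict_py (entry : List (String × String)) (out : List (String × String)) : Prop := out = extract_metadata_from_dict_py_alt entry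
instance (entry : List (String × String)) (out : List (String × String)) : Decidable (Spec_extract_metadata_from_dict_py entry out) := by unfold Spec_extract_metadata_from_dict_py; infer_instance

-- ===== CLAIM (what is proved, stated in full; the proofs are below) =====
def Claim_equal_extract_metadata_from_dict_py : Prop := ∀ (entry : List (String × String)), Dom_extract_metadata_from_dict_py entry → Pre_extract_metadata_from_dict_py entry → Spec_extract_metadata_from_dict_py entry (extract_metadata_from_dict_py entry)

-- ===== LEMMAS AND PROOFS =====

-- Building a dict from a list with distinct keys reproduces the list as the items.
lemma ofList_items_of_nodup {ν : Type} (l : List (String × ν)) (h : (l.map Prod.fst).Nodup) :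
    (PySem.Dict.ofList l).items = l := by
  show (l.foldl (fun acc p => acc.insert p.1 p.2) PySem.Dict.empty).items = l
  rw [PySem.Dict.items_foldl_insert_fresh l Prod.fst Prod.snd PySem.Dict.empty
        (fun a _ => PySem.Dict.contains_empty a.1) h]
  simp [PySem.Dict.empty]

-- A's loop over distinct fields, appending a pair per present field, is a filterMap.
lemma foldl_fields_items (e : PySem.Dict String String) (fs : List String)
    (acc : PySem.Dict String String) (hnd : fs.Nodup)
    (hdisj : ∀ f ∈ fs, acc.contains f = false) :
    (fs.foldl (fun m f =>
        match e.get? f with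
        | some v => m.insert f v
        | none => m) acc).items
      = acc.items ++ fs.filterMap (fun f => (e.get? f).map (fun v => (f, v))) := by
  induction fs generalizing acc with
  | nil => simp
  | cons f t ih =>
    have hfa : acc.contains f = false := hdisj f (List.mem_cons_self ..)
    have hnd' : t.Nodup := hnd.of_cons
    have hft : f ∉ t := (List.nodup_cons.mp hnd).1
    cases hget : e.get? f with
    | none =>
      simp only [List.foldl_cons, List.filterMap_cons, hget]
      exact ih acc hnd' (fun g hg => hdisj g (List.mem_cons_of_mem _ hg))
    | some v =>
      simp only [List.foldl_cons, List.filterMap_cons, hget, Option.map_some]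
      rw [ih (acc.insert f v) hnd' ?_]
      · rw [PySem.Dict.items_insert_of_not_contains acc v hfa, List.append_assoc]
        rfl
      · intro g hg
        rw [PySem.Dict.contains_insert]
        have : (g == f) = false := beq_eq_false_iff_ne.mpr (fun hgf => hft (hgf ▸ hg))
        simp [this, hdisj g (List.mem_cons_of_mem _ hg)]

lemma nodup_keys_filterMap {ν : Type} (l : List String) (o : String → Option ν)
    (h : l.Nodup) :
    ((l.filterMap (fun f => (o f).map (fun v => (f, v)))).map Prod.fst).Nodup := by
  refine List.Sublist.nodup ?_ h
  clear h
  induction l with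
  | nil => simp
  | cons a t ih =>
    cases ho : o a with
    | none => simpa [List.filterMap_cons, ho] using ih.cons a
    | some v => simpa [List.filterMap_cons, ho] using ih.cons₂ a

-- the slot dict's keys are exactly the fields, in order
lemma keys_fieldSlots : fieldSlots.keys = fieldOrder := rfl

-- a miss in the slot dict means the key is not a field
lemma fieldSlots_none (k : String) (h : fieldSlots.get? k = none) : k ∉ fieldOrder := by
  rw [PySem.Dict.get?_eq_none_iff_not_mem_keys, keys_fieldSlots] at h
  exact h

-- a hit in the slot dict names a position of fieldOrder
lemma fieldSlots_some (k : String) (i : Int) (h : fieldSlots.get? k = some i) :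
    ∃ j : Nat, i = (j : Int) ∧ j < 12 ∧ fieldOrder[j]? = some k := by
  have hk : k ∈ fieldOrder := by
    by_contra hk
    rw [← keys_fieldSlots, ← PySem.Dict.get?_eq_none_iff_not_mem_keys] at hk
    rw [hk] at h
    simp at h
  fin_cases hk
  · rw [show fieldSlots.get? "user_id" = some 0 from rfl] at h
    exact ⟨0, (Option.some.inj h).symm, by omega, by decide⟩
  · rw [show fieldSlots.get? "request_id" = some 1 from rfl] at h
    exact ⟨1, (Option.some.inj h).symm, by omega, by decide⟩
  · rw [show fieldSlots.get? "session_id" = some 2 from rfl] at h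
    exact ⟨2, (Option.some.inj h).symm, by omega, by decide⟩
  · rw [show fieldSlots.get? "ip_address" = some 3 from rfl] at h
    exact ⟨3, (Option.some.inj h).symm, by omega, by decide⟩
  · rw [show fieldSlots.get? "http_status" = some 4 from rfl] at h
    exact ⟨4, (Option.some.inj h).symm, by omega, by decide⟩
  · rw [show fieldSlots.get? "status_code" = some 5 from rfl] at h
    exact ⟨5, (Option.some.inj h).symm, by omega, by decide⟩
  · rw [show fieldSlots.get? "response_time" = some 6 from rfl] at h
    exact ⟨6, (Option.some.inj h).symm, by omega, by decide⟩
  · rw [show fieldSlots.get? "duration" = some 7 from rfl] at h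
    exact ⟨7, (Option.some.inj h).symm, by omega, by decide⟩
  · rw [show fieldSlots.get? "source_ip" = some 8 from rfl] at h
    exact ⟨8, (Option.some.inj h).symm, by omega, by decide⟩
  · rw [show fieldSlots.get? "user_agent" = some 9 from rfl] at h
    exact ⟨9, (Option.some.inj h).symm, by omega, by decide⟩
  · rw [show fieldSlots.get? "endpoint" = some 10 from rfl] at h
    exact ⟨10, (Option.some.inj h).symm, by omega, by decide⟩
  · rw [show fieldSlots.get? "method" = some 11 from rfl] at h
    exact ⟨11, (Option.some.inj h).symm, by omega, by decide⟩

-- After B's one pass, slot j holds the (unique) entry pair keyed by field j, else the old slot.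
lemma foldl_slotStep (l : List (String × String)) :
    ∀ slots : List (Option (String × String)), slots.length = 12 →
    (l.map Prod.fst).Nodup →
    l.foldl slotStep slots
      = (fieldOrder.zip slots).map
          (fun fs => match (PySem.Dict.mk l).get? fs.1 with
                     | some v => some (fs.1, v)
                     | none => fs.2) := by
  induction l with
  | nil =>
    intro slots hlen _
    have hl : slots.length ≤ fieldOrder.length := by rw [hlen]; decide
    simp only [List.foldl_nil]
    calc slots = (fieldOrder.zip slots).map Prod.snd := (List.map_snd_zip hl).symm
      _ = _ := by
          apply List.map_congr_left
          intro fs _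
          have : (PySem.Dict.mk ([] : List (String × String))).get? fs.1 = none := rfl
          rw [this]
  | cons p t ih =>
    intro slots hlen hnd
    obtain ⟨k, v⟩ := p
    have h0 : (k :: t.map Prod.fst).Nodup := by simpa using hnd
    have hnd' : (t.map Prod.fst).Nodup := (List.nodup_cons.mp h0).2
    have hkt : k ∉ t.map Prod.fst := (List.nodup_cons.mp h0).1
    have hget_t_k : (PySem.Dict.mk t).get? k = none := by
      rw [PySem.Dict.get?_eq_none_iff_not_mem_keys]
      simpa [PySem.Dict.keys] using hkt
    simp only [List.foldl_cons]
    show t.foldl slotStep (slotStep slots (k, v)) = _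
    cases hsk : fieldSlots.get? k with
    | none =>
      have hstep : slotStep slots (k, v) = slots := by simp [slotStep, hsk]
      rw [hstep, ih slots hlen hnd']
      apply List.map_congr_left
      intro fs hfs
      have hf_mem : fs.1 ∈ fieldOrder := (List.of_mem_zip hfs).1
      have hkf : (k == fs.1) = false :=
        beq_eq_false_iff_ne.mpr (fun he => fieldSlots_none k hsk (he ▸ hf_mem))
      rw [PySem.Dict.get?_mk_cons]
      simp [hkf]
    | some i =>
      obtain ⟨j, rfl, hj12, hfj⟩ := fieldSlots_some k i hsk
      have hstep : slotStep slots (k, v) = slots.set j (some (k, v)) := by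
        simp [slotStep, hsk, PySem.List.pySetD_natCast]
      have hlen' : (slots.set j (some (k, v))).length = 12 := by simp [hlen]
      have hflen : fieldOrder.length = 12 := by decide
      have hfjm : fieldOrder[j]'(by omega) = k := by
        have h2 := List.getElem?_eq_getElem (l := fieldOrder) (i := j) (by omega)
        rw [hfj] at h2
        exact (Option.some.inj h2).symm
      rw [hstep, ih _ hlen' hnd']
      apply List.ext_getElem
      · simp
      · intro m hm1 hm2
        have hm : m < 12 := by
          have := List.lt_length_left_of_zip (by simpa using hm1)
          omega
        simp only [List.getElem_map, List.getElem_zip, List.getElem_set,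
                   PySem.Dict.get?_mk_cons]
        by_cases hmj : j = m
        · subst hmj
          simp [hget_t_k, hfjm]
        · have hnodup : fieldOrder.Nodup := by decide
          have hne : fieldOrder[m]'(by omega) ≠ k := by
            intro he
            exact hmj (hnodup.getElem_inj_iff.mp (hfjm.trans he.symm).symm).symm
          have hkm : (k == fieldOrder[m]'(by omega)) = false :=
            beq_eq_false_iff_ne.mpr (fun h => hne h.symm)
          simp [hkm, hmj]

-- zipping the fields with the all-empty slot table and reading slots is a map over the fields
lemma zip_replicate_none (F : String → Option String) :
    (fieldOrder.zip (List.replicate 12 (none : Option (String × String)))).map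
        (fun fs => match F fs.1 with
                   | some v => some (fs.1, v)
                   | none => fs.2)
      = fieldOrder.map (fun f => (F f).map (fun v => (f, v))) := by
  have hz : fieldOrder.zip (List.replicate 12 (none : Option (String × String)))
      = fieldOrder.map (fun f => (f, (none : Option (String × String)))) := by decide
  rw [hz, List.map_map]
  apply List.map_congr_left
  intro f _
  cases hFf : F f <;> simp [hFf]

-- ===== VERDICT (by name: the statement is the Claim_ definition above) =====
theorem extract_metadata_from_dict_py_spec : Claim_equal_extract_metadata_from_dict_py := by
  intro entry _ hpre
  unfold Spec_extract_metadata_from_dict_py extract_metadata_from_dict_py extract_metadata_from_dict_py_alt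
  rw [foldl_fields_items (PySem.Dict.mk entry) metadataFields PySem.Dict.empty
        (by decide) (fun f _ => PySem.Dict.contains_empty f)]
  show _ = (PySem.Dict.ofList ((entry.foldl slotStep (List.replicate 12 none)).filterMap id)).items
  rw [foldl_slotStep entry (List.replicate 12 none) (by simp) hpre,
      zip_replicate_none (fun f => (PySem.Dict.mk entry).get? f)]
  rw [List.filterMap_map]
  rw [ofList_items_of_nodup _ (by
    have := nodup_keys_filterMap fieldOrder (fun f => (PySem.Dict.mk entry).get? f) (by decide)
    simpa [Function.comp] using this)]
  simp [PySem.Dict.empty, metadataFields, fieldOrder, Function.comp]
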